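-- pv_equiv track=rewrite | github.com/cas-bioinf/rboAnalyzer | rna_blast_analyze/BR_core/db2shape.py | nesting
-- ===== SOURCE A (Python) =====
-- def nesting(seq, br=('(',')'), gap_mark=0, initial_val=1, input_gap_mark='.'):
--     """br must be nesting brackets of the kind you want to analyze"""
--     c = initial_val
--     nest = []   # nest should be same length as seq at the end
--     for char in seq:
--         if char == br[0]:
--             nest.append(c)
--             c += 1
--         elif char == br[1]:
--             c -= 1
--             nest.append(c)
--         elif char == input_gap_mark:
--             nest.append(gap_mark)
--         else:
--             raise ValueError('Encountered char, which is not present in input character set: char:{}'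
--                              ' input brackets: {}{}, input gap character: {}'.format(char,
--                                                                                      br[0],
--                                                                                      br[1],
--                                                                                      input_gap_mark))
--     return c, nest
-- ===== SOURCE B (Python) =====
-- def nesting(seq, br=('(',')'), gap_mark=0, initial_val=1, input_gap_mark='.'):
--     """br must be nesting brackets of the kind you want to analyze"""
--     # pass 1: per-char deltas (+1 open, -1 close, 0 gap); unknown chars raise as in the spec
--     deltas = []
--     for char in seq:
--         if char == br[0]:
--             deltas.append(1)
--         elif char == br[1]:
--             deltas.append(-1)
--         elif char == input_gap_mark:
--             deltas.append(0)
--         else: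
--             raise ValueError('Encountered char, which is not present in input character set: char:{}'
--                              ' input brackets: {}{}, input gap character: {}'.format(char,
--                                                                                      br[0],
--                                                                                      br[1],
--                                                                                      input_gap_mark))
--     # pass 2: cumulative level table of length n+1
--     levels = [initial_val]
--     for d in deltas:
--         levels.append(levels[-1] + d)
--     # pass 3: a gap shows gap_mark; a bracket shows the min of its adjacent levels
--     nest = [gap_mark if (ch == input_gap_mark and ch != br[0] and ch != br[1])
--             else min(lo, hi)
--             for ch, lo, hi in zip(seq, levels, levels[1:])]
--     return levels[-1], nest
-- ===== Notes on version B (the rewrite author's own statement) =====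
-- stated objective: alternative
-- what changed: B replaces A's single loop that mutates a counter and appends per branch by three passes: a per-char delta list, a cumulative prefix-sum level table, and a reconstruction pass that emits gap_mark for gaps and min of the two adjacent levels for brackets.
import Mathlib
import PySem

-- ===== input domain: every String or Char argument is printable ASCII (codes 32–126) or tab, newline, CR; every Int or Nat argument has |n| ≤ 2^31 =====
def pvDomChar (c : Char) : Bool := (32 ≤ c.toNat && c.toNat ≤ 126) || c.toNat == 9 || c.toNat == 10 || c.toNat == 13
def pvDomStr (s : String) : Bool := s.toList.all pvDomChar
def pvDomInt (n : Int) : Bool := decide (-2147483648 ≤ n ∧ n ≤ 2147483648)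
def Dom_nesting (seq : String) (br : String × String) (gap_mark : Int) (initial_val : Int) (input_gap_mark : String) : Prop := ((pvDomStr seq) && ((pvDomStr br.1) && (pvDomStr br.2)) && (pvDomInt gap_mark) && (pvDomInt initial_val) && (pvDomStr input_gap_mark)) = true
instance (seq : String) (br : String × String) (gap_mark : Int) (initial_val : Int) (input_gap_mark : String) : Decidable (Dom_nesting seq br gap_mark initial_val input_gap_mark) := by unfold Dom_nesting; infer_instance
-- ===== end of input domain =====

-- B is an alternative 3-pass decomposition (delta list, prefix-sum level table, min-of-adjacent-levels
-- reconstruction) of A's single counter loop; same O(n) cost; agreement proved on Pre_ (where A returns).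

-- ===== PORT A =====
-- A's single loop: counter c, list nest, one append per char (the `else` raise branch yields no value;
-- such inputs are outside Pre_nesting, the port just keeps the state there).
def nesting (seq : String) (br : String × String) (gap_mark : Int) (initial_val : Int) (input_gap_mark : String) : Int × List Int :=
  seq.toList.foldl
    (fun (st : Int × List Int) ch =>
      if String.ofList [ch] = br.1 then (st.1 + 1, st.2 ++ [st.1])
      else if String.ofList [ch] = br.2 then (st.1 - 1, st.2 ++ [st.1 - 1])
      else if String.ofList [ch] = input_gap_mark then (st.1, st.2 ++ [gap_mark])
      else st)
    (initial_val, [])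

-- ===== PORT B =====
-- pass 1 of Source B: the per-char delta (the raise branch of Source B yields no value; outside Pre_ it is 0 here)
def nestingAltDelta (br : String × String) (ch : Char) : Int :=
  if String.ofList [ch] = br.1 then 1
  else if String.ofList [ch] = br.2 then -1
  else 0

def nesting_alt (seq : String) (br : String × String) (gap_mark : Int) (initial_val : Int) (input_gap_mark : String) : Int × List Int :=
  let deltas := seq.toList.map (nestingAltDelta br)
  -- pass 2: levels = [initial_val]; for d in deltas: levels.append(levels[-1] + d)
  let levels := deltas.foldl (fun ls d => ls ++ [ls.getLast! + d]) [initial_val]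
  -- pass 3: zip(seq, levels, levels[1:])
  let nest := (seq.toList.zip (levels.zip levels.tail)).map
    (fun p =>
      if String.ofList [p.1] = input_gap_mark ∧ String.ofList [p.1] ≠ br.1 ∧ String.ofList [p.1] ≠ br.2
      then gap_mark else min p.2.1 p.2.2)
  (levels.getLast!, nest)

-- ===== PRECONDITION & SPEC =====
-- Pre_ excludes exactly the inputs on which A raises ValueError (a char that is none of br[0], br[1],
-- input_gap_mark); B raises the identical ValueError there.
def Pre_nesting (seq : String) (br : String × String) (gap_mark : Int) (initial_val : Int) (input_gap_mark : String) : Prop :=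
  (seq.toList.all (fun ch => br.1.toList == [ch] || br.2.toList == [ch] || input_gap_mark.toList == [ch])) = true
instance (seq : String) (br : String × String) (gap_mark : Int) (initial_val : Int) (input_gap_mark : String) : Decidable (Pre_nesting seq br gap_mark initial_val input_gap_mark) := by unfold Pre_nesting; infer_instance

def pvWitness_nesting : String × (String × String) × Int × Int × String := ("(.())", ("(", ")"), 0, 1, ".")

def Spec_nesting (seq : String) (br : String × String) (gap_mark : Int) (initial_val : Int) (input_gap_mark : String) (out : Int × List Int) : Prop := out = nesting_alt seq br gap_mark initial_val input_gap_mark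
instance (seq : String) (br : String × String) (gap_mark : Int) (initial_val : Int) (input_gap_mark : String) (out : Int × List Int) : Decidable (Spec_nesting seq br gap_mark initial_val input_gap_mark out) := by unfold Spec_nesting; infer_instance

-- ===== CLAIM (what is proved, stated in full; the proofs are below) =====
def Claim_equal_nesting : Prop := ∀ (seq : String) (br : String × String) (gap_mark : Int) (initial_val : Int) (input_gap_mark : String), Dom_nesting seq br gap_mark initial_val input_gap_mark → Pre_nesting seq br gap_mark initial_val input_gap_mark → Spec_nesting seq br gap_mark initial_val input_gap_mark (nesting seq br gap_mark initial_val input_gap_mark)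

-- ===== LEMMAS AND PROOFS =====

-- common reference run (final counter, emitted list), used only in the proofs
def pvRun (b1 b2 igm : String) (g : Int) : List Char → Int → Int × List Int
  | [], c => (c, [])
  | ch :: t, c =>
    if String.ofList [ch] = b1 then
      let r := pvRun b1 b2 igm g t (c + 1); (r.1, c :: r.2)
    else if String.ofList [ch] = b2 then
      let r := pvRun b1 b2 igm g t (c - 1); (r.1, (c - 1) :: r.2)
    else if String.ofList [ch] = igm then
      let r := pvRun b1 b2 igm g t c; (r.1, g :: r.2)
    else
      pvRun b1 b2 igm g t c

-- the level table as a recursive function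
def pvLev (br : String × String) : List Char → Int → List Int
  | [], c => [c]
  | ch :: t, c => c :: pvLev br t (c + nestingAltDelta br ch)

lemma pvLev_ne_nil (br : String × String) (cs : List Char) (c : Int) : pvLev br cs c ≠ [] := by
  cases cs <;> simp [pvLev]

lemma foldA_eq (b1 b2 igm : String) (g : Int) (cs : List Char) :
    ∀ (c : Int) (acc : List Int),
      cs.foldl (fun (st : Int × List Int) ch =>
        if String.ofList [ch] = b1 then (st.1 + 1, st.2 ++ [st.1])
        else if String.ofList [ch] = b2 then (st.1 - 1, st.2 ++ [st.1 - 1])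
        else if String.ofList [ch] = igm then (st.1, st.2 ++ [g])
        else st) (c, acc)
      = ((pvRun b1 b2 igm g cs c).1, acc ++ (pvRun b1 b2 igm g cs c).2) := by
  induction cs with
  | nil => intro c acc; simp [pvRun]
  | cons ch t ih =>
    intro c acc
    by_cases h1 : String.ofList [ch] = b1
    · simp [pvRun, h1, ih]
    · by_cases h2 : String.ofList [ch] = b2
      · have e1 : ¬ b2 = b1 := fun h => h1 (h2.trans h)
        simp [pvRun, h1, h2, e1, ih]
      · by_cases h3 : String.ofList [ch] = igm
        · have e1 : ¬ igm = b1 := fun h => h1 (h3.trans h)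
          have e2 : ¬ igm = b2 := fun h => h2 (h3.trans h)
          simp [pvRun, h1, h2, h3, e1, e2, ih]
        · simp [pvRun, h1, h2, h3, ih]

lemma foldLev_eq (br : String × String) (cs : List Char) :
    ∀ (c : Int) (xs : List Int),
      (cs.map (nestingAltDelta br)).foldl (fun ls d => ls ++ [ls.getLast! + d]) (xs ++ [c])
      = xs ++ pvLev br cs c := by
  induction cs with
  | nil => intro c xs; simp [pvLev]
  | cons ch t ih =>
    intro c xs
    have : (xs ++ [c]) ++ [(xs ++ [c]).getLast! + nestingAltDelta br ch]
         = (xs ++ [c]) ++ [c + nestingAltDelta br ch] := by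
      simp
    simp only [List.map_cons, List.foldl_cons, this]
    have := ih (c + nestingAltDelta br ch) (xs ++ [c])
    simpa [pvLev] using this

lemma pvLev_getLast (b1 b2 igm : String) (g : Int) (br : String × String)
    (hb1 : br.1 = b1) (hb2 : br.2 = b2) (cs : List Char) :
    ∀ c : Int, (pvLev br cs c).getLast! = (pvRun b1 b2 igm g cs c).1 := by
  induction cs with
  | nil => intro c; simp [pvLev, pvRun]
  | cons ch t ih =>
    intro c
    have hne := pvLev_ne_nil br t (c + nestingAltDelta br ch)
    have hlast : (pvLev br (ch :: t) c).getLast! = (pvLev br t (c + nestingAltDelta br ch)).getLast! := by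
      show (c :: pvLev br t (c + nestingAltDelta br ch)).getLast! = _
      cases hE : pvLev br t (c + nestingAltDelta br ch) with
      | nil => exact absurd hE hne
      | cons a s => simp
    rw [hlast, ih]
    by_cases h1 : String.ofList [ch] = b1
    · simp [pvRun, nestingAltDelta, hb1, hb2, h1]
    · by_cases h2 : String.ofList [ch] = b2
      · have e1 : ¬ b2 = b1 := fun h => h1 (h2.trans h)
        have hv : c + nestingAltDelta br ch = c - 1 := by
          simp [nestingAltDelta, hb1, hb2, h1, h2, e1]; ring
        rw [hv]
        simp [pvRun, h1, h2, e1]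
      · by_cases h3 : String.ofList [ch] = igm
        · have e1 : ¬ igm = b1 := fun h => h1 (h3.trans h)
          have e2 : ¬ igm = b2 := fun h => h2 (h3.trans h)
          have hv : c + nestingAltDelta br ch = c := by
            simp [nestingAltDelta, hb1, hb2, h1, h2]
          rw [hv]
          simp [pvRun, h1, h2, h3, e1, e2]
        · have hv : c + nestingAltDelta br ch = c := by
            simp [nestingAltDelta, hb1, hb2, h1, h2]
          rw [hv]
          simp [pvRun, h1, h2, h3]

-- peeling one character off the zip of seq with adjacent level pairs
lemma pvZip_cons (br : String × String) (ch : Char) (t : List Char) (c : Int) :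
    (ch :: t).zip ((pvLev br (ch :: t) c).zip (pvLev br (ch :: t) c).tail)
    = (ch, (c, c + nestingAltDelta br ch))
      :: t.zip ((pvLev br t (c + nestingAltDelta br ch)).zip
                (pvLev br t (c + nestingAltDelta br ch)).tail) := by
  cases t with
  | nil => simp [pvLev]
  | cons x xs => simp [pvLev]

lemma pvLev_zip_eq (b1 b2 igm : String) (g : Int) (br : String × String)
    (hb1 : br.1 = b1) (hb2 : br.2 = b2) (cs : List Char)
    (hpre : ∀ ch ∈ cs, String.ofList [ch] = b1 ∨ String.ofList [ch] = b2 ∨ String.ofList [ch] = igm) :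
    ∀ c : Int,
      (cs.zip ((pvLev br cs c).zip (pvLev br cs c).tail)).map
        (fun p =>
          if String.ofList [p.1] = igm ∧ String.ofList [p.1] ≠ b1 ∧ String.ofList [p.1] ≠ b2
          then g else min p.2.1 p.2.2)
      = (pvRun b1 b2 igm g cs c).2 := by
  induction cs with
  | nil => intro c; simp [pvLev, pvRun]
  | cons ch t ih =>
    intro c
    have hpre' : ∀ x ∈ t, String.ofList [x] = b1 ∨ String.ofList [x] = b2 ∨ String.ofList [x] = igm := by
      intro x hx; exact hpre x (by simp [hx])
    have ihc := ih hpre' (c + nestingAltDelta br ch)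
    rw [pvZip_cons, List.map_cons, ihc]
    by_cases h1 : String.ofList [ch] = b1
    · have hd : nestingAltDelta br ch = 1 := by simp [nestingAltDelta, hb1, h1]
      have hmin : min c (c + nestingAltDelta br ch) = c := by rw [hd]; omega
      rw [hd] at ihc ⊢
      simp [pvRun, h1, hmin, hd]
    · by_cases h2 : String.ofList [ch] = b2
      · have e1 : ¬ b2 = b1 := fun h => h1 (h2.trans h)
        have hd : nestingAltDelta br ch = -1 := by
          simp [nestingAltDelta, hb1, hb2, h1, h2, e1]
        have hv : c + nestingAltDelta br ch = c - 1 := by rw [hd]; ring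
        have hmin : min c (c + nestingAltDelta br ch) = c - 1 := by rw [hd]; omega
        rw [hmin, hv]
        simp [pvRun, h1, h2, e1]
      · have hch := hpre ch (by simp)
        have h3 : String.ofList [ch] = igm := by tauto
        have e1 : ¬ igm = b1 := fun h => h1 (h3.trans h)
        have e2 : ¬ igm = b2 := fun h => h2 (h3.trans h)
        have hv : c + nestingAltDelta br ch = c := by
          simp [nestingAltDelta, hb1, hb2, h1, h2]
        rw [hv]
        simp [pvRun, h1, h2, h3, e1, e2]

lemma pre_chars (seq : String) (br : String × String) (gap_mark : Int) (initial_val : Int)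
    (input_gap_mark : String) (h : Pre_nesting seq br gap_mark initial_val input_gap_mark) :
    ∀ ch ∈ seq.toList, String.ofList [ch] = br.1 ∨ String.ofList [ch] = br.2 ∨ String.ofList [ch] = input_gap_mark := by
  intro ch hch
  have := List.all_eq_true.mp h ch hch
  simp only [Bool.or_eq_true, beq_iff_eq] at this
  rcases this with (h1 | h2) | h3
  · left; rw [← String.ofList_toList (s := br.1), h1]
  · right; left; rw [← String.ofList_toList (s := br.2), h2]
  · right; right; rw [← String.ofList_toList (s := input_gap_mark), h3]

-- ===== VERDICT (by name: the statement is the Claim_ definition above) =====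
theorem nesting_spec : Claim_equal_nesting := by
  intro seq br gap_mark initial_val input_gap_mark _ hpre0
  have hpre := pre_chars seq br gap_mark initial_val input_gap_mark hpre0
  unfold Spec_nesting nesting nesting_alt
  have hA := foldA_eq br.1 br.2 input_gap_mark gap_mark seq.toList initial_val []
  have hL := foldLev_eq br seq.toList initial_val []
  simp only [List.nil_append] at hA hL
  have hrun := pvLev_getLast br.1 br.2 input_gap_mark gap_mark br rfl rfl seq.toList initial_val
  have hzip := pvLev_zip_eq br.1 br.2 input_gap_mark gap_mark br rfl rfl seq.toList hpre initial_val
  rw [hA]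
  simp only [hL, hrun, hzip]
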